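-- pv_equiv track=rewrite | github.com/sainttelant/Impromptu-VLA | data_qa_generate/dataset_generation/prompt_stages/prompt_road_agent_analysis_text.py | fix_helper_ret
-- ===== SOURCE A (Python) =====
-- def fix_helper_ret(helper_ret: str):
--     helper_ret_lines = helper_ret.split('\n')  # Split by newline
--     processed_lines = []
--
--     for line in helper_ret_lines:
--         quote_indices = [i for i, char in enumerate(line) if char == '"']  # Find all quote positions
--
--         # A piece of UGLY code that maps
--         #  "characteristics": "A white van with "FACTORY OUTLET" writt...
--         # to
--         #  "characteristics": "A white van with FACTORY OUTLET writt...
--         if len(quote_indices) > 4: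
--             # Keep the first three quotes and the last one
--             keep_indices = quote_indices[:3] + [quote_indices[-1]]
--             kill_indices = []
--             for idx in quote_indices:
--                 if idx not in keep_indices:
--                     kill_indices.append(idx)
--             # REMOVE all quotes that are in kill_indices, from right to left
--             new_line = line
--             for i in kill_indices[::-1]:
--                 new_line = new_line[:i] + new_line[i + 1:]
--
--             processed_lines.append(new_line)
--         else:
--             # Keep the line as is if it has 4 or fewer quotes
--             processed_lines.append(line)
--
--     helper_ret_fixed = '\n'.join(processed_lines)
--     return helper_ret_fixed
-- ===== SOURCE B (Python) =====
-- def fix_helper_ret(helper_ret: str):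
--     out_lines = []
--     for line in helper_ret.split('\n'):
--         n = sum(1 for ch in line if ch == '"')
--         if n > 4:
--             # single pass: keep the 1st-3rd quotes and the n-th, drop the rest
--             kept = []
--             seen = 0
--             for ch in line:
--                 if ch == '"':
--                     seen += 1
--                     if seen <= 3 or seen == n:
--                         kept.append(ch)
--                 else:
--                     kept.append(ch)
--             out_lines.append(''.join(kept))
--         else:
--             out_lines.append(line)
--     return '\n'.join(out_lines)
-- ===== Notes on version B (the rewrite author's own statement) =====
-- stated objective: faster
-- what changed: Instead of building quote-index/keep/kill lists and re-slicing the whole string once per killed quote (quadratic in line length), B counts the quotes once and rebuilds each line in a single left-to-right pass with a running quote counter, keeping a quote only if it is among the first three or the last.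
import Mathlib
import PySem

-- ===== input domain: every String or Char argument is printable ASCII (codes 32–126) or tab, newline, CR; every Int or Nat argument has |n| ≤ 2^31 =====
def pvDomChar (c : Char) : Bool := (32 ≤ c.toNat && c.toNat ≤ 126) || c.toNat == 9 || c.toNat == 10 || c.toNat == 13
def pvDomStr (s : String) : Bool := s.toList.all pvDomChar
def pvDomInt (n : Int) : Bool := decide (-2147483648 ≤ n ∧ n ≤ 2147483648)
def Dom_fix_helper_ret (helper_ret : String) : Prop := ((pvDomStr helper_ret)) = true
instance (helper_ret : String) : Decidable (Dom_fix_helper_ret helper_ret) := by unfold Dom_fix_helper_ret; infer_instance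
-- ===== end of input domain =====

-- B rebuilds each line in one counting pass instead of A's per-quote re-slicing.

-- ===== PORT A =====
-- [i for i, char in enumerate(line) if char == '"']
def aQuoteIdx (i : Nat) : List Char → List Nat
  | [] => []
  | c :: t => if c = '"' then i :: aQuoteIdx (i + 1) t else aQuoteIdx (i + 1) t

-- one line of A's loop body
def aLine (line : String) : String :=
  let l := line.toList
  let qs := aQuoteIdx 0 l
  if 4 < qs.length then
    -- keep_indices = quote_indices[:3] + [quote_indices[-1]]  (qs is nonempty here, so getD's default is unreachable)
    let keep := qs.take 3 ++ [qs.getLast?.getD 0]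
    -- for idx in quote_indices: if idx not in keep_indices: kill_indices.append(idx)
    let kill := qs.foldl (fun acc idx => if idx ∈ keep then acc else acc ++ [idx]) ([] : List Nat)
    -- for i in kill_indices[::-1]: new_line = new_line[:i] + new_line[i+1:]
    String.ofList (kill.reverse.foldl (fun s i => s.take i ++ s.drop (i + 1)) l)
  else line

def fix_helper_ret (helper_ret : String) : String :=
  -- helper_ret.split('\n'): the separator is nonempty, so split? is always some and getD's default is unreachable
  let lines := (PySem.Str.split? helper_ret "\n").getD []
  let processed := lines.foldl (fun acc line => acc ++ [aLine line]) []
  PySem.Str.join "\n" processed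

-- ===== PORT B =====
-- n = sum(1 for ch in line if ch == '"')
def bCount (l : List Char) : Nat :=
  l.foldl (fun a c => if c = '"' then a + 1 else a) 0

-- one line of B's loop body: a single pass over the characters with state (seen, kept);
-- st.1 + 1 is 'seen' after 'seen += 1'
def bLine (line : String) : String :=
  let n := bCount line.toList
  if 4 < n then
    String.ofList
      (line.toList.foldl
        (fun (st : Nat × List Char) c =>
          if c = '"' then
            if st.1 + 1 ≤ 3 ∨ st.1 + 1 = n then (st.1 + 1, st.2 ++ [c]) else (st.1 + 1, st.2)
          else (st.1, st.2 ++ [c]))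
        (0, ([] : List Char))).2
  else line

def fix_helper_ret_alt (helper_ret : String) : String :=
  PySem.Str.join "\n" (((PySem.Str.split? helper_ret "\n").getD []).map bLine)

-- ===== PRECONDITION & SPEC =====
def Spec_fix_helper_ret (helper_ret : String) (out : String) : Prop := out = fix_helper_ret_alt helper_ret
instance (helper_ret : String) (out : String) : Decidable (Spec_fix_helper_ret helper_ret out) := by unfold Spec_fix_helper_ret; infer_instance

-- ===== CLAIM (what is proved, stated in full; the proofs are below) =====
def Claim_equal_fix_helper_ret : Prop := ∀ (helper_ret : String), Dom_fix_helper_ret helper_ret → Spec_fix_helper_ret helper_ret (fix_helper_ret helper_ret)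

-- ===== LEMMAS AND PROOFS =====

-- canonical per-line recursion: keep a quote iff its 1-based ordinal is ≤ 3 or = n
def scanRec (n k : Nat) : List Char → List Char
  | [] => []
  | c :: t =>
    if c = '"' then
      if k + 1 ≤ 3 ∨ k + 1 = n then c :: scanRec n (k + 1) t else scanRec n (k + 1) t
    else c :: scanRec n k t

-- indices (within l) of the quotes whose ordinal is killed (ordinal > 3 and ≠ n)
def killPos (n k : Nat) : List Char → List Nat
  | [] => []
  | c :: t =>
    if c = '"' then
      if 3 < k + 1 ∧ k + 1 ≠ n then 0 :: (killPos n (k + 1) t).map (· + 1)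
      else (killPos n (k + 1) t).map (· + 1)
    else (killPos n k t).map (· + 1)

-- the same kill selection, reading off a list of quote indices by position
def ordKill (n k : Nat) : List Nat → List Nat
  | [] => []
  | i :: r => if 3 < k + 1 ∧ k + 1 ≠ n then i :: ordKill n (k + 1) r else ordKill n (k + 1) r

theorem bCount_go (l : List Char) (a : Nat) :
    l.foldl (fun a c => if c = '"' then a + 1 else a) a = a + l.count '"' := by
  induction l generalizing a with
  | nil => simp
  | cons c t ih =>
    simp only [List.foldl_cons, List.count_cons, ih]
    by_cases h : c = '"' <;> simp [h] <;> omega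

theorem bCount_eq (l : List Char) : bCount l = l.count '"' := by
  simpa using bCount_go l 0

theorem count_eq_len_aQuoteIdx (l : List Char) : ∀ i, l.count '"' = (aQuoteIdx i l).length := by
  induction l with
  | nil => intro i; rfl
  | cons c t ih =>
    intro i
    by_cases h : c = '"' <;> simp [aQuoteIdx, h, List.count_cons, ih (i + 1)]

theorem aQuoteIdx_ge (l : List Char) : ∀ i x, x ∈ aQuoteIdx i l → i ≤ x := by
  induction l with
  | nil => intro i x hx; simp [aQuoteIdx] at hx
  | cons c t ih =>
    intro i x hx
    by_cases h : c = '"' <;> simp [aQuoteIdx, h] at hx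
    · rcases hx with rfl | hx
      · exact le_refl _
      · exact le_of_lt (ih (i + 1) x hx)
    · exact le_of_lt (ih (i + 1) x hx)

theorem aQuoteIdx_pairwise (l : List Char) : ∀ i, (aQuoteIdx i l).Pairwise (· < ·) := by
  induction l with
  | nil => intro i; simp [aQuoteIdx]
  | cons c t ih =>
    intro i
    by_cases h : c = '"' <;> simp [aQuoteIdx, h]
    · exact ⟨fun x hx => lt_of_lt_of_le (Nat.lt_succ_self i) (aQuoteIdx_ge t (i + 1) x hx), ih (i + 1)⟩
    · exact ih (i + 1)

theorem aQuoteIdx_succ (t : List Char) : ∀ i, aQuoteIdx (i + 1) t = (aQuoteIdx i t).map (· + 1) := by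
  induction t with
  | nil => intro i; rfl
  | cons c t ih =>
    intro i
    by_cases h : c = '"'
    · rw [aQuoteIdx, aQuoteIdx, if_pos h, if_pos h, ih (i + 1)]
      simp
    · rw [aQuoteIdx, aQuoteIdx, if_neg h, if_neg h, ih (i + 1)]

theorem ordKill_map (n : Nat) (f : Nat → Nat) (qs : List Nat) :
    ∀ k, ordKill n k (qs.map f) = (ordKill n k qs).map f := by
  induction qs with
  | nil => intro k; rfl
  | cons i r ih =>
    intro k
    rw [List.map_cons, ordKill, ordKill]
    by_cases h : 3 < k + 1 ∧ k + 1 ≠ n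
    · rw [if_pos h, if_pos h, ih (k + 1), List.map_cons]
    · rw [if_neg h, if_neg h, ih (k + 1)]

theorem killPos_eq_ordKill (n : Nat) (l : List Char) :
    ∀ k, killPos n k l = ordKill n k (aQuoteIdx 0 l) := by
  induction l with
  | nil => intro k; rfl
  | cons c t ih =>
    intro k
    by_cases h : c = '"'
    · have hq : aQuoteIdx 0 (c :: t) = 0 :: (aQuoteIdx 0 t).map (· + 1) := by
        rw [aQuoteIdx, if_pos h, aQuoteIdx_succ t 0]
      rw [hq, killPos, if_pos h, ordKill]
      by_cases hk : 3 < k + 1 ∧ k + 1 ≠ n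
      · rw [if_pos hk, if_pos hk, ordKill_map, ih (k + 1)]
      · rw [if_neg hk, if_neg hk, ordKill_map, ih (k + 1)]
    · have hq : aQuoteIdx 0 (c :: t) = (aQuoteIdx 0 t).map (· + 1) := by
        rw [aQuoteIdx, if_neg h, aQuoteIdx_succ t 0]
      rw [hq, killPos, if_neg h, ordKill_map, ih k]

-- deleting shifted indices from c :: t leaves c and deletes the unshifted indices from t
theorem foldr_erase_shift (ks : List Nat) (c : Char) (t : List Char) :
    (ks.map (· + 1)).foldr (fun i s => s.eraseIdx i) (c :: t)
      = c :: ks.foldr (fun i s => s.eraseIdx i) t := by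
  induction ks with
  | nil => rfl
  | cons k r ih => simp [List.foldr_cons, ih, List.eraseIdx_cons_succ]

-- MAIN: right-to-left deletion at the kill positions = the single counting pass
theorem foldr_erase_killPos (n : Nat) (l : List Char) :
    ∀ k, (killPos n k l).foldr (fun i s => s.eraseIdx i) l = scanRec n k l := by
  induction l with
  | nil => intro k; rfl
  | cons c t ih =>
    intro k
    by_cases h : c = '"'
    · by_cases hk : 3 < k + 1 ∧ k + 1 ≠ n
      · have hkeep : ¬ (k + 1 ≤ 3 ∨ k + 1 = n) := by omega
        rw [killPos, if_pos h, if_pos hk, scanRec, if_pos h, if_neg hkeep]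
        simp only [List.foldr_cons, foldr_erase_shift, List.eraseIdx_cons_zero]
        exact ih (k + 1)
      · have hkeep : k + 1 ≤ 3 ∨ k + 1 = n := by omega
        rw [killPos, if_pos h, if_neg hk, scanRec, if_pos h, if_pos hkeep,
          foldr_erase_shift, ih (k + 1)]
    · rw [killPos, if_neg h, scanRec, if_neg h, foldr_erase_shift, ih k]

theorem kill_loop_eq_filter (keep : List Nat) (qs : List Nat) :
    ∀ acc, qs.foldl (fun acc idx => if idx ∈ keep then acc else acc ++ [idx]) acc
      = acc ++ qs.filter (fun i => ¬ i ∈ keep) := by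
  induction qs with
  | nil => intro acc; simp
  | cons i r ih =>
    intro acc
    by_cases h : i ∈ keep <;> simp [List.foldl_cons, h, ih, List.filter_cons]

theorem ordKill_all_but_last (n : Nat) (rest : List Nat) :
    ∀ k, 3 ≤ k → k + rest.length = n → ordKill n k rest = rest.dropLast := by
  induction rest with
  | nil => intro k _ _; rfl
  | cons x t ih =>
    intro k hk hn
    cases t with
    | nil =>
      have hn1 : k + 1 = n := by simpa using hn
      have hcond : ¬ (3 < k + 1 ∧ k + 1 ≠ n) := by omega
      rw [ordKill, if_neg hcond]
      rfl
    | cons y s =>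
      have hcond : 3 < k + 1 ∧ k + 1 ≠ n := by
        simp only [List.length_cons] at hn; omega
      have ht : (y :: s : List Nat) ≠ [] := by simp
      rw [ordKill, if_pos hcond,
        ih (k + 1) (by omega) (by simp only [List.length_cons] at hn ⊢; omega),
        List.dropLast_cons_of_ne_nil ht]

theorem getLastD_mem (t : List Nat) (h : t ≠ []) : t.getLast?.getD 0 ∈ t := by
  cases ht : t.getLast? with
  | none => simp [List.getLast?_eq_none_iff] at ht; exact absurd ht h
  | some a => simpa using List.mem_of_getLast? ht

theorem filter_keep_tail (keep3 : List Nat) (rest : List Nat) :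
    rest ≠ [] → rest.Pairwise (· < ·) → (∀ x ∈ rest, ∀ y ∈ keep3, y < x) →
    rest.filter (fun i => ¬ i ∈ keep3 ++ [rest.getLast?.getD 0]) = rest.dropLast := by
  induction rest with
  | nil => intro h; exact absurd rfl h
  | cons x t ih =>
    intro _ hp hgt
    cases t with
    | nil => simp [List.filter_cons]
    | cons y s =>
      have ht : (y :: s : List Nat) ≠ [] := by simp
      have hlast : ((x :: y :: s : List Nat)).getLast?.getD 0 = ((y :: s : List Nat)).getLast?.getD 0 := by
        rw [List.getLast?_cons_cons]
      have hxlt : ∀ z ∈ (y :: s : List Nat), x < z := by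
        intro z hz; exact (List.pairwise_cons.mp hp).1 z hz
      have hxne : ¬ x ∈ keep3 ++ [((x :: y :: s : List Nat)).getLast?.getD 0] := by
        rw [hlast]
        simp only [List.mem_append, List.mem_singleton]
        rintro (hx | hx)
        · exact absurd (hgt x (by simp) x hx) (lt_irrefl x)
        · have := hxlt _ (getLastD_mem (y :: s) ht)
          omega
      rw [List.filter_cons, if_pos (by simpa using hxne), hlast,
        ih ht (List.pairwise_cons.mp hp).2
          (fun z hz w hw => hgt z (List.mem_cons_of_mem _ hz) w hw),
        List.dropLast_cons_of_ne_nil ht]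

theorem filter_eq_ordKill (qs : List Nat) (h5 : 4 < qs.length) (hp : qs.Pairwise (· < ·)) :
    qs.filter (fun i => ¬ i ∈ qs.take 3 ++ [qs.getLast?.getD 0]) = ordKill qs.length 0 qs := by
  match qs, h5 with
  | a :: b :: c :: rest, h5 =>
    have hrest : rest ≠ [] := by
      intro h; subst h; simp at h5
    have hlast : ((a :: b :: c :: rest : List Nat)).getLast?.getD 0 = rest.getLast?.getD 0 := by
      rw [List.getLast?_cons_cons, List.getLast?_cons_cons]
      cases rest with
      | nil => exact absurd rfl hrest
      | cons r rs => rw [List.getLast?_cons_cons]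
    have hpa := List.pairwise_cons.mp hp
    have hpb := List.pairwise_cons.mp hpa.2
    have hpc := List.pairwise_cons.mp hpb.2
    have hgt : ∀ x ∈ rest, ∀ y ∈ ([a, b, c] : List Nat), y < x := by
      intro x hx y hy
      simp only [List.mem_cons] at hy
      rcases hy with rfl | rfl | rfl | h
      · exact hpa.1 x (by simp [hx])
      · exact hpb.1 x (by simp [hx])
      · exact hpc.1 x hx
      · simp at h
    have htake : ((a :: b :: c :: rest : List Nat)).take 3 = [a, b, c] := by simp [List.take]
    rw [htake, hlast]
    have ha : (a ∈ ([a, b, c] : List Nat) ++ [rest.getLast?.getD 0]) := by simp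
    have hb : (b ∈ ([a, b, c] : List Nat) ++ [rest.getLast?.getD 0]) := by simp
    have hc : (c ∈ ([a, b, c] : List Nat) ++ [rest.getLast?.getD 0]) := by simp
    rw [List.filter_cons, List.filter_cons, List.filter_cons]
    simp only [ha, hb, hc, decide_not, decide_true, Bool.not_true, if_false]
    have hfilter := filter_keep_tail [a, b, c] rest hrest hpc.2 hgt
    have hord : ordKill ((a :: b :: c :: rest : List Nat)).length 0 (a :: b :: c :: rest)
        = ordKill ((a :: b :: c :: rest : List Nat)).length 3 rest := by
      have h1 : ¬ (3 < 0 + 1 ∧ 0 + 1 ≠ ((a :: b :: c :: rest : List Nat)).length) := by omega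
      have h2 : ¬ (3 < 1 + 1 ∧ 1 + 1 ≠ ((a :: b :: c :: rest : List Nat)).length) := by omega
      have h3 : ¬ (3 < 2 + 1 ∧ 2 + 1 ≠ ((a :: b :: c :: rest : List Nat)).length) := by omega
      rw [ordKill, if_neg h1, ordKill, if_neg h2, ordKill, if_neg h3]
    rw [hord, ordKill_all_but_last _ rest 3 (by omega) (by simp only [List.length_cons]; omega)]
    simpa using hfilter

-- A's whole then-branch (kill-list construction + right-to-left re-slicing) is the counting pass
theorem aLine_core (l : List Char) (h : 4 < (aQuoteIdx 0 l).length) :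
    ((aQuoteIdx 0 l).foldl
        (fun acc idx =>
          if idx ∈ (aQuoteIdx 0 l).take 3 ++ [(aQuoteIdx 0 l).getLast?.getD 0] then acc
          else acc ++ [idx]) []).reverse.foldl
      (fun s i => s.take i ++ s.drop (i + 1)) l
      = scanRec (aQuoteIdx 0 l).length 0 l := by
  rw [kill_loop_eq_filter, List.nil_append,
    filter_eq_ordKill _ h (aQuoteIdx_pairwise l 0), ← killPos_eq_ordKill,
    List.foldl_reverse]
  have hconv : ∀ (ks : List Nat) (s : List Char),
      ks.foldr (fun i s => s.take i ++ s.drop (i + 1)) s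
        = ks.foldr (fun i s => s.eraseIdx i) s := by
    intro ks s
    induction ks with
    | nil => rfl
    | cons k r ih => simp [List.foldr_cons, ih, ← List.eraseIdx_eq_take_drop_succ]
  rw [hconv, foldr_erase_killPos]

-- B's foldl with (seen, kept) state appends scanRec to the accumulator
theorem bScan_foldl (n : Nat) (l : List Char) :
    ∀ (seen : Nat) (acc : List Char),
      (l.foldl
        (fun (st : Nat × List Char) c =>
          if c = '"' then
            if st.1 + 1 ≤ 3 ∨ st.1 + 1 = n then (st.1 + 1, st.2 ++ [c]) else (st.1 + 1, st.2)
          else (st.1, st.2 ++ [c]))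
        (seen, acc)).2 = acc ++ scanRec n seen l := by
  induction l with
  | nil => intro seen acc; simp [scanRec]
  | cons c t ih =>
    intro seen acc
    rw [List.foldl_cons, scanRec]
    by_cases h : c = '"'
    · rw [if_pos h, if_pos h]
      by_cases hk : seen + 1 ≤ 3 ∨ seen + 1 = n
      · rw [if_pos hk, if_pos hk, ih (seen + 1) (acc ++ [c])]
        simp [h]
      · rw [if_neg hk, if_neg hk, ih (seen + 1) acc]
    · rw [if_neg h, if_neg h, ih seen (acc ++ [c])]
      simp

theorem aLine_eq_bLine (line : String) : aLine line = bLine line := by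
  simp only [aLine, bLine, bCount_eq, count_eq_len_aQuoteIdx line.toList 0]
  by_cases h : 4 < (aQuoteIdx 0 line.toList).length
  · rw [if_pos h, if_pos h, aLine_core line.toList h,
      bScan_foldl (aQuoteIdx 0 line.toList).length line.toList 0 []]
    simp
  · rw [if_neg h, if_neg h]

-- ===== VERDICT (by name: the statement is the Claim_ definition above) =====
theorem fix_helper_ret_spec : Claim_equal_fix_helper_ret := by
  intro helper_ret _
  unfold Spec_fix_helper_ret
  simp only [fix_helper_ret, fix_helper_ret_alt]
  rw [PySem.List.foldl_append_singleton_eq_map, List.nil_append]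
  congr 1
  exact List.map_congr_left (fun line _ => aLine_eq_bLine line)
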